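-- pv_equiv track=rewrite | github.com/AndersonFreixo/python-projects | dec_to_bin_hex.py | prettify_bin
-- ===== SOURCE A (Python) =====
-- def prettify_bin(raw_str):
-- 	"""Transforms the raw string of '0' and '1' given by dec_to_bin()
-- into a more readable form by separating the bits in groups of fours"""
--
-- 	pretty_bin = ''
-- 	#First, add leading zeros to the original string
-- 	#if the leftmost group has less than four bits
--
-- 	while len(raw_str) %4 > 0:
-- 		raw_str = "{}{}".format('0',raw_str)
--
-- 	#Then put the characters in the new variable
-- 	#adding a space after each group of four bits
-- 	for bit in range(len(raw_str)):
-- 		if (bit)%4 == 0: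
-- 			pretty_bin+=' '
-- 		pretty_bin+=raw_str[bit]
-- 	return pretty_bin
-- ===== SOURCE B (Python) =====
-- def prettify_bin(raw_str):
--     pad = -len(raw_str) % 4
--     padded = '0' * pad + raw_str
--     return ''.join(' ' + padded[i:i + 4] for i in range(0, len(padded), 4))
-- ===== Notes on version B (the rewrite author's own statement) =====
-- stated objective: simpler
-- what changed: Replaces the one-zero-at-a-time padding while-loop and the per-character index loop with a closed-form pad count (-len % 4) prepended in one step, and a join over 4-character slices instead of appending characters one by one.
import Mathlib
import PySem

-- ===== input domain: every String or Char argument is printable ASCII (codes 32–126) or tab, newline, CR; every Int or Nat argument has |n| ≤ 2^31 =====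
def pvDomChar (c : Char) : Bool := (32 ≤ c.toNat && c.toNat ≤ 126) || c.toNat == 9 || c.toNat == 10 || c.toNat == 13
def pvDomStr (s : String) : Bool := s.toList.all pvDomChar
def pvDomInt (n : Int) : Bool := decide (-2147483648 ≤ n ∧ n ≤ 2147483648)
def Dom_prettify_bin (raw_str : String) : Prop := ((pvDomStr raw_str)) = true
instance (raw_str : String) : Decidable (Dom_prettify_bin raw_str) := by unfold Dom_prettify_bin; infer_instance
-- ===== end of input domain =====

-- B replaces A's one-zero-at-a-time padding loop and per-character fold by a
-- closed-form pad count plus a loop over 4-character slices (objective: simpler).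

-- ===== PORT A =====
-- the 'while len(raw_str) % 4 > 0: raw_str = "0" + raw_str' loop
def padLoopA (s : List Char) : List Char :=
  if s.length % 4 > 0 then padLoopA ('0' :: s) else s
termination_by (4 - s.length % 4) % 4
decreasing_by simp_all; omega

def prettify_bin (raw_str : String) : String :=
  -- pretty_bin starts as '' and each iteration appends to it
  let raw := padLoopA raw_str.toList
  String.ofList <| (List.range raw.length).foldl
    (fun acc (bit : Nat) =>
      (if bit % 4 == 0 then acc ++ [' '] else acc) ++ [PySem.List.pyGetD raw (bit : Int) ' '])
    []

-- ===== PORT B =====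
def prettify_bin_alt (raw_str : String) : String :=
  let pad := (PySem.Int.mod (-(raw_str.toList.length : Int)) 4).toNat
  let padded := List.replicate pad '0' ++ raw_str.toList
  String.ofList <| (PySem.List.pyRange 0 (padded.length : Int) 4).foldl
    (fun acc i => acc ++ (' ' :: PySem.List.slice padded (some i) (some (i + 4)))) []

-- ===== PRECONDITION & SPEC =====
def Spec_prettify_bin (raw_str : String) (out : String) : Prop := out = prettify_bin_alt raw_str
instance (raw_str : String) (out : String) : Decidable (Spec_prettify_bin raw_str out) := by unfold Spec_prettify_bin; infer_instance

-- ===== CLAIM (what is proved, stated in full; the proofs are below) =====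
def Claim_equal_prettify_bin : Prop := ∀ (raw_str : String), Dom_prettify_bin raw_str → Spec_prettify_bin raw_str (prettify_bin raw_str)

-- ===== LEMMAS AND PROOFS =====

-- common characterisation: one space before every group of four characters
def chunk4 : List Char → List Char
  | a :: b :: c :: d :: t => ' ' :: a :: b :: c :: d :: chunk4 t
  | [] => []
  | l => ' ' :: l

lemma padLoopA_eq (s : List Char) :
    padLoopA s = List.replicate ((4 - s.length % 4) % 4) '0' ++ s := by
  unfold padLoopA
  split
  · rw [padLoopA_eq ('0' :: s)]
    have h1 : (4 - (('0' :: s).length) % 4) % 4 + 1 = (4 - s.length % 4) % 4 := by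
      simp only [List.length_cons]; omega
    rw [← h1, List.replicate_add]
    simp
  · have : (4 - s.length % 4) % 4 = 0 := by omega
    simp [this]
termination_by (4 - s.length % 4) % 4
decreasing_by simp_all; omega

lemma foldA_eq (l : List Char) (acc : List Char) (h : l.length % 4 = 0) :
    (List.range l.length).foldl
      (fun a bit => (if bit % 4 == 0 then a ++ [' '] else a) ++ [l.getD bit ' ']) acc
    = acc ++ chunk4 l := by
  match l with
  | [] => simp [chunk4]
  | [a] => simp at h
  | [a, b] => simp at h
  | [a, b, c] => simp at h
  | a :: b :: c :: d :: t =>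
    have hlen : (a :: b :: c :: d :: t).length = 4 + t.length := by simp; omega
    have ht : t.length % 4 = 0 := by simp at h; omega
    rw [hlen, List.range_add, List.foldl_append, List.foldl_map]
    have step1 : (List.range 4).foldl
        (fun a' bit => (if bit % 4 == 0 then a' ++ [' '] else a') ++
          [(a :: b :: c :: d :: t).getD bit ' ']) acc
        = acc ++ [' ', a, b, c, d] := by
      simp [List.range_succ, List.getD]
    rw [step1]
    have step2 : (fun (a' : List Char) (bit : ℕ) =>
          (if (4 + bit) % 4 == 0 then a' ++ [' '] else a') ++
            [(a :: b :: c :: d :: t).getD (4 + bit) ' '])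
        = (fun a' bit => (if bit % 4 == 0 then a' ++ [' '] else a') ++ [t.getD bit ' ']) := by
      funext a' bit
      have h4 : (4 + bit) % 4 = bit % 4 := by omega
      have h5 : 4 + bit = bit + 1 + 1 + 1 + 1 := by omega
      rw [h4, h5]
      simp
    rw [step2, foldA_eq t (acc ++ [' ', a, b, c, d]) ht]
    simp [chunk4]
termination_by l.length

lemma foldB_eq (m : ℕ) (l : List Char) (acc : List Char) (h : l.length = 4 * m) :
    (List.range m).foldl (fun a k => a ++ (' ' :: (l.drop (4 * k)).take 4)) acc
    = acc ++ chunk4 l := by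
  induction m generalizing l acc with
  | zero =>
    have : l = [] := List.eq_nil_of_length_eq_zero (by omega)
    simp [this, chunk4]
  | succ n ih =>
    match l with
    | [] => simp at h
    | [a] | [a, b] | [a, b, c] => simp at h; omega
    | a :: b :: c :: d :: t =>
      have ht : t.length = 4 * n := by simp at h; omega
      have hr : (1 : ℕ) + n = n + 1 := by omega
      rw [← hr, List.range_add, List.foldl_append, List.foldl_map]
      have step1 : (List.range 1).foldl
          (fun a' k => a' ++ (' ' :: ((a :: b :: c :: d :: t).drop (4 * k)).take 4)) acc
          = acc ++ [' ', a, b, c, d] := by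
        simp [List.range_succ]
      rw [step1]
      have step2 : (fun (a' : List Char) (k : ℕ) =>
            a' ++ (' ' :: ((a :: b :: c :: d :: t).drop (4 * (1 + k))).take 4))
          = (fun a' k => a' ++ (' ' :: (t.drop (4 * k)).take 4)) := by
        funext a' k
        have h5 : 4 * (1 + k) = 4 * k + 1 + 1 + 1 + 1 := by omega
        rw [h5]
        simp [List.drop_succ_cons]
      rw [step2, ih t (acc ++ [' ', a, b, c, d]) ht]
      simp [chunk4]

-- the pyRange/slice loop of port B, reduced to the plain chunk fold of foldB_eq
lemma foldB_pyRange (m : ℕ) (l : List Char) (h : l.length = 4 * m) :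
    (PySem.List.pyRange 0 (l.length : Int) 4).foldl
      (fun acc i => acc ++ (' ' :: PySem.List.slice l (some i) (some (i + 4)))) []
    = chunk4 l := by
  rw [PySem.List.pyRange_of_pos 0 (l.length : Int) (by norm_num)]
  have hcount : (if (0 : Int) < (l.length : Int)
      then (((l.length : Int) - 0 + 4 - 1) / 4).toNat else 0) = m := by
    split <;> omega
  rw [hcount, List.foldl_map]
  have step : (fun (acc : List Char) (k : ℕ) =>
        acc ++ (' ' :: PySem.List.slice l (some (0 + 4 * (k : Int))) (some (0 + 4 * (k : Int) + 4))))
      = (fun acc k => acc ++ (' ' :: (l.drop (4 * k)).take 4)) := by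
    funext acc k
    rw [show ((0 : Int) + 4 * (k : Int) + 4) = ((4 * k + 4 : ℕ) : Int) by push_cast; ring]
    rw [show ((0 : Int) + 4 * (k : Int)) = ((4 * k : ℕ) : Int) by push_cast; ring]
    rw [PySem.List.slice_natCast]
    have h3 : 4 * k + 4 - 4 * k = 4 := by omega
    rw [h3]
  rw [step, foldB_eq m l [] h]
  simp

lemma pad_toNat (n : ℕ) : (PySem.Int.mod (-(n : Int)) 4).toNat = (4 - n % 4) % 4 := by
  unfold PySem.Int.mod
  rw [Int.fmod_eq_emod]
  simp
  omega

-- ===== VERDICT (by name: the statement is the Claim_ definition above) =====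
theorem prettify_bin_spec : Claim_equal_prettify_bin := by
  intro raw_str _
  simp only [Spec_prettify_bin, prettify_bin, prettify_bin_alt]
  set s := raw_str.toList with hs
  rw [pad_toNat, ← padLoopA_eq]
  have hlen : (padLoopA s).length % 4 = 0 := by
    rw [padLoopA_eq]; simp; omega
  obtain ⟨m, hm⟩ : ∃ m, (padLoopA s).length = 4 * m := ⟨(padLoopA s).length / 4, by omega⟩
  rw [foldB_pyRange m (padLoopA s) hm]
  congr 1
  have step : (fun (acc : List Char) (bit : ℕ) =>
        (if bit % 4 == 0 then acc ++ [' '] else acc) ++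
          [PySem.List.pyGetD (padLoopA s) (bit : Int) ' '])
      = (fun acc bit => (if bit % 4 == 0 then acc ++ [' '] else acc) ++
          [(padLoopA s).getD bit ' ']) := by
    funext acc bit
    rw [PySem.List.pyGetD_natCast]
  rw [step, foldA_eq (padLoopA s) [] hlen]
  simp
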